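-- pv_equiv track=rewrite | github.com/leonardvetter/random_tree_simulation | random_tree_simulation/helpers/draw_bgw_tree.py | reconstruct_plane_tree
-- ===== SOURCE A (Python) =====
-- from typing import List, Dict, Tuple
--
-- def reconstruct_plane_tree(children_counts: List[int]) -> Dict[int, List[int]]:
--     """
--     Rebuild the rooted plane tree (children order preserved) from preorder counts.
--     Returns adjacency as {parent: [child0, child1, ...]} with root=0 always present.
--     """
--     n = len(children_counts)
--     children: Dict[int, List[int]] = {i: [] for i in range(n)}
--
--     stack: List[Tuple[int, int]] = []  # (node_id, remaining_children_to_attach)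
--     for i, k in enumerate(children_counts):
--         # attach to current parent (top of stack) if any
--         if stack:
--             parent, rem = stack[-1]
--             children[parent].append(i)
--             rem -= 1
--             stack[-1] = (parent, rem)
--
--         # push current node with its number of children
--         stack.append((i, k))
--
--         # pop any finished nodes
--         while stack and stack[-1][1] == 0:
--             stack.pop()
--
--     if stack:
--         # Should be empty if the sequence was consistent
--         raise ValueError("Sequence ended prematurely (unmatched remaining children).")
--     return children
-- ===== SOURCE B (Python) =====
-- from typing import List, Dict
--
-- def reconstruct_plane_tree(children_counts: List[int]) -> Dict[int, List[int]]:
--     """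
--     Rebuild the rooted plane tree from preorder counts, in two passes:
--     a right-to-left pass computing every subtree size, then a left-to-right
--     pass attaching each node's children at the size-derived offsets.
--     """
--     n = len(children_counts)
--     sizes = [0] * n
--     roots: List[int] = []  # sizes of completed subtrees to the right
--     for i in range(n - 1, -1, -1):
--         k = children_counts[i]
--         if k < 0 or k > len(roots):
--             raise ValueError("Sequence ended prematurely (unmatched remaining children).")
--         s = 1
--         for _ in range(k):
--             s += roots.pop()
--         sizes[i] = s
--         roots.append(s)
--
--     children: Dict[int, List[int]] = {i: [] for i in range(n)}
--     for i, k in enumerate(children_counts):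
--         c = i + 1
--         for _ in range(k):
--             children[i].append(c)
--             c += sizes[c]
--     return children
-- ===== Notes on version B (the rewrite author's own statement) =====
-- stated objective: alternative
-- what changed: A simulates a single left-to-right pass with an explicit stack of (node, remaining-children) pairs, attaching each node to the current stack top; B instead computes every subtree size in a right-to-left pass over completed-subtree sizes and then attaches each node's children directly at the size-derived offsets in a second left-to-right pass.
import Mathlib
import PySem

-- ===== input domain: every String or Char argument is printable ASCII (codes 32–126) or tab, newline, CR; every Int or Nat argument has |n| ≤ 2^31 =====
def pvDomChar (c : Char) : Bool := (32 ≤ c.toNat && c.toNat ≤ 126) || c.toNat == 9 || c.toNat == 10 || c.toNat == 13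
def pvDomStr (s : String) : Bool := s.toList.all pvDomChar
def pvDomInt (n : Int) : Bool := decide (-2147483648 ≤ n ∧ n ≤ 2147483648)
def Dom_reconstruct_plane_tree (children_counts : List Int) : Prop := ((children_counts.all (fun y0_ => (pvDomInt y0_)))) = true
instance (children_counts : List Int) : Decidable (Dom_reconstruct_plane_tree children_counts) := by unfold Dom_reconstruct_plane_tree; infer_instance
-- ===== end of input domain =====

-- B rebuilds the tree from precomputed subtree sizes (two passes) instead of A's
-- explicit (node, remaining-children) stack; equal return value on Pre_ (where A returns).

-- ===== PORT A =====
-- Python's stack has its top at the END; the port keeps the top at the HEAD.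
def pvPopZeros (st : List (Int × Int)) : List (Int × Int) :=
  match st with
  | (i, k) :: rest => if k = 0 then pvPopZeros rest else (i, k) :: rest
  | [] => []

def pvStepA (s : PySem.Dict Int (List Int) × List (Int × Int)) (ik : Int × Int) :
    PySem.Dict Int (List Int) × List (Int × Int) :=
  let (children, stack) :=
    match s.2 with
    | (parent, rem) :: rest =>
        (s.1.modify parent [] (fun l => l ++ [ik.1]), (parent, rem - 1) :: rest)
    | [] => (s.1, s.2)
  (children, pvPopZeros ((ik.1, ik.2) :: stack))

def reconstruct_plane_tree (children_counts : List Int) : List (Int × List Int) :=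
  let n : Int := children_counts.length
  let children : PySem.Dict Int (List Int) :=
    (PySem.List.pyRange 0 n 1).foldl (fun d i => d.insert i []) PySem.Dict.empty
  let res := (PySem.List.enumerate children_counts).foldl pvStepA (children, [])
  -- Python raises ValueError when res.2 ≠ []; Pre_ excludes exactly those inputs
  res.1.items

-- ===== PORT B =====
-- right-to-left sizes pass; Python raises ValueError when k < 0 or k > len(roots),
-- Pre_ excludes exactly those inputs (there take/drop agree with the pop loop)
def pvSizesStep (k : Int) (st : List Int × List Int) : List Int × List Int :=
  let s : Int := 1 + (st.2.take k.toNat).sum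
  (s :: st.1, s :: st.2.drop k.toNat)

-- left-to-right attachment of one node's children at size-derived offsets
def pvAttach (sizes : List Int) (d : PySem.Dict Int (List Int)) (ik : Int × Int) :
    PySem.Dict Int (List Int) :=
  ((List.range ik.2.toNat).foldl
    (fun (dc : PySem.Dict Int (List Int) × Int) _ =>
      (dc.1.modify ik.1 [] (fun l => l ++ [dc.2]), dc.2 + PySem.List.pyGetD sizes dc.2 0))
    (d, ik.1 + 1)).1

def reconstruct_plane_tree_alt (children_counts : List Int) : List (Int × List Int) :=
  let n : Int := children_counts.length
  let sizes := (children_counts.foldr pvSizesStep ([], [])).1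
  let children : PySem.Dict Int (List Int) :=
    (PySem.List.pyRange 0 n 1).foldl (fun d i => d.insert i []) PySem.Dict.empty
  ((PySem.List.enumerate children_counts).foldl (pvAttach sizes) children).items

-- ===== PRECONDITION & SPEC =====
-- Pre_ holds exactly when the counts are the preorder child counts of a plane forest
-- (all counts nonnegative and the Łukasiewicz path ends strictly below every earlier
-- point); on all other inputs both Pythons raise ValueError.
def Pre_reconstruct_plane_tree (children_counts : List Int) : Prop :=
  (∀ k ∈ children_counts, 0 ≤ k) ∧
  ∀ m ∈ List.range children_counts.length,
    children_counts.sum - (children_counts.length : Int) <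
      ((children_counts.take m).sum : Int) - (m : Int)

instance (children_counts : List Int) : Decidable (Pre_reconstruct_plane_tree children_counts) := by
  unfold Pre_reconstruct_plane_tree; infer_instance

def pvWitness_reconstruct_plane_tree : List Int := [0, 1, 0, 0, 0, 0, 0, 0, 0, 0, 0, 0]

def Spec_reconstruct_plane_tree (children_counts : List Int) (out : List (Int × List Int)) : Prop :=
  out = reconstruct_plane_tree_alt children_counts
instance (children_counts : List Int) (out : List (Int × List Int)) : Decidable (Spec_reconstruct_plane_tree children_counts out) := by
  unfold Spec_reconstruct_plane_tree; infer_instance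

-- ===== CLAIM (what is proved, stated in full; the proofs are below) =====
def Claim_equal_reconstruct_plane_tree : Prop := ∀ (children_counts : List Int), Dom_reconstruct_plane_tree children_counts → Pre_reconstruct_plane_tree children_counts → Spec_reconstruct_plane_tree children_counts (reconstruct_plane_tree children_counts)

-- ===== LEMMAS AND PROOFS =====

-- the Łukasiewicz path of the counts: P m = (sum of the first m counts) - m
def pvP (cc : List Int) (m : Nat) : Int := ((cc.take m).sum) - (m : Int)

-- first strict descent after i (n+… fallback keeps it total)
theorem pvE_ex (cc : List Int) (i : Nat) :
    ∃ m, (i < m ∧ m ≤ cc.length ∧ pvP cc m = pvP cc i - 1) ∨ (cc.length < m ∧ i < m) :=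
  ⟨cc.length + i + 1, Or.inr ⟨by omega, by omega⟩⟩

def pvE (cc : List Int) (i : Nat) : Nat := Nat.find (pvE_ex cc i)

theorem pvE_gt (cc : List Int) (i : Nat) : i < pvE cc i := by
  have h := Nat.find_spec (pvE_ex cc i)
  rcases h with ⟨h1, _⟩ | ⟨_, h2⟩ <;> [exact h1; exact h2]

-- sizes of the maximal complete subtrees covering the suffix from i
def pvRootsOf (cc : List Int) (i : Nat) : List Int :=
  if h : i < cc.length then ((pvE cc i - i : Nat) : Int) :: pvRootsOf cc (pvE cc i) else []
termination_by cc.length + 1 - i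
decreasing_by have := pvE_gt cc i; omega

-- children index list of node v (the chain i+1, pvE (i+1), …)
def pvChl (cc : List Int) (v : Nat) : List Int :=
  (List.range (cc.getD v 0).toNat).map (fun j => (((pvE cc)^[j] (v + 1) : Nat) : Int))

-- segment of the enumerated input
def pvSeg (cc : List Int) (i j : Nat) : List (Int × Int) :=
  (List.range' i (j - i)).map (fun (m : Nat) => ((m : Int), cc.getD m 0))
theorem pvP_succ (cc : List Int) (m : Nat) (hm : m < cc.length) :
    pvP cc (m + 1) = pvP cc m + cc.getD m 0 - 1 := by
  unfold pvP
  rw [List.sum_take_succ _ _ hm]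
  rw [List.getD_eq_getElem?_getD, List.getElem?_eq_getElem hm, Option.getD_some]
  push_cast
  ring

theorem pvE_spec (cc : List Int) (i : Nat)
    (hk : ∀ m < cc.length, 0 ≤ cc.getD m 0)
    (hp : ∀ m < cc.length, pvP cc cc.length < pvP cc m)
    (hi : i < cc.length) :
    pvE cc i ≤ cc.length ∧ pvP cc (pvE cc i) = pvP cc i - 1 := by
  have hex : ∃ m, i < m ∧ m ≤ cc.length ∧ pvP cc m ≤ pvP cc i - 1 := by
    refine ⟨cc.length, hi, le_refl _, ?_⟩
    have := hp i hi; omega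
  obtain ⟨h1, h2, h3⟩ := Nat.find_spec hex
  have hMeq : pvP cc (Nat.find hex) = pvP cc i - 1 := by
    have hstep : pvP cc (Nat.find hex - 1 + 1) = pvP cc (Nat.find hex - 1) + cc.getD (Nat.find hex - 1) 0 - 1 :=
      pvP_succ cc _ (by omega)
    rw [show Nat.find hex - 1 + 1 = Nat.find hex by omega] at hstep
    have hk' := hk (Nat.find hex - 1) (by omega)
    by_cases hMi : Nat.find hex - 1 = i
    · rw [hMi] at hstep hk'; omega
    · have hmin := Nat.find_min hex (m := Nat.find hex - 1) (by omega)
      have hlt : pvP cc i - 1 < pvP cc (Nat.find hex - 1) := by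
        by_contra hcon
        push_neg at hcon
        exact hmin ⟨by omega, by omega, hcon⟩
      omega
  have hle : pvE cc i ≤ Nat.find hex :=
    Nat.find_min' (pvE_ex cc i) (Or.inl ⟨h1, h2, hMeq⟩)
  have hle' : Nat.find (pvE_ex cc i) ≤ Nat.find hex := hle
  rcases Nat.find_spec (pvE_ex cc i) with ⟨_, hb, hc⟩ | ⟨ha, _⟩
  · exact ⟨hb, hc⟩
  · exfalso; omega

theorem pvE_min (cc : List Int) (i m : Nat)
    (h1 : i < m) (h2 : m < pvE cc i) (h3 : m ≤ cc.length) :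
    pvP cc m ≠ pvP cc i - 1 := by
  intro hcon
  exact Nat.find_min (pvE_ex cc i) h2 (Or.inl ⟨h1, h3, hcon⟩)

theorem pvE_lb (cc : List Int) (i : Nat)
    (hk : ∀ m < cc.length, 0 ≤ cc.getD m 0)
    (hp : ∀ m < cc.length, pvP cc cc.length < pvP cc m)
    (hi : i < cc.length) :
    ∀ m, i ≤ m → m < pvE cc i → pvP cc i ≤ pvP cc m := by
  have hEn := (pvE_spec cc i hk hp hi).1
  intro m him hm
  induction m with
  | zero => have : i = 0 := by omega
            simp [this]
  | succ m ih =>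
    by_cases hmi : i = m + 1
    · simp [← hmi]
    · have him' : i ≤ m := by omega
      have ihm := ih him' (by omega)
      have hstep := pvP_succ cc m (by omega)
      have hk' := hk m (by omega)
      have hne := pvE_min cc i (m + 1) (by omega) hm (by omega)
      omega
theorem pvChain (cc : List Int) (i : Nat)
    (hk : ∀ m < cc.length, 0 ≤ cc.getD m 0)
    (hp : ∀ m < cc.length, pvP cc cc.length < pvP cc m)
    (hi : i < cc.length) :
    ∀ j ≤ (cc.getD i 0).toNat,
      (pvE cc)^[j] (i+1) ≤ cc.length ∧
      pvP cc ((pvE cc)^[j] (i+1)) = pvP cc i + ((cc.getD i 0).toNat : Int) - 1 - (j : Int) ∧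
      (j < (cc.getD i 0).toNat → (pvE cc)^[j] (i+1) < cc.length) := by
  intro j
  induction j with
  | zero =>
    intro _
    have hstep := pvP_succ cc i hi
    have hnn := hk i hi
    refine ⟨hi, ?_, ?_⟩
    · simp only [Function.iterate_zero, id]
      rw [hstep, Int.toNat_of_nonneg hnn]
      push_cast; ring
    · intro hK
      simp only [Function.iterate_zero, id]
      by_contra hcon
      have heq : i + 1 = cc.length := by omega
      rw [heq] at hstep
      have := hp i hi
      omega
  | succ j ih =>
    intro hj
    obtain ⟨h1, h2, h3⟩ := ih (by omega)
    have hcj : (pvE cc)^[j] (i+1) < cc.length := h3 (by omega)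
    have hspec := pvE_spec cc ((pvE cc)^[j] (i+1)) hk hp hcj
    rw [Function.iterate_succ_apply']
    refine ⟨hspec.1, ?_, ?_⟩
    · rw [hspec.2, h2]; push_cast; ring
    · intro hK
      by_contra hcon
      have heq : pvE cc ((pvE cc)^[j] (i+1)) = cc.length := by omega
      rw [heq] at hspec
      have := hp i hi
      omega

theorem pvChainCover (cc : List Int) (i : Nat)
    (hk : ∀ m < cc.length, 0 ≤ cc.getD m 0)
    (hp : ∀ m < cc.length, pvP cc cc.length < pvP cc m)
    (hi : i < cc.length) :
    ∀ j ≤ (cc.getD i 0).toNat, ∀ m, i + 1 ≤ m → m < (pvE cc)^[j] (i+1) →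
      pvP cc i ≤ pvP cc m := by
  intro j
  induction j with
  | zero => intro _ m hm1 hm2; simp only [Function.iterate_zero, id] at hm2; omega
  | succ j ih =>
    intro hj m hm1 hm2
    rw [Function.iterate_succ_apply'] at hm2
    by_cases hcase : m < (pvE cc)^[j] (i+1)
    · exact ih (by omega) m hm1 hcase
    · obtain ⟨h1, h2, h3⟩ := pvChain cc i hk hp hi j (by omega)
      have hcj := h3 (by omega)
      have hlb := pvE_lb cc ((pvE cc)^[j] (i+1)) hk hp hcj m (by omega) hm2
      omega

theorem pvChain_ge (cc : List Int) (i : Nat) :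
    ∀ j, i + 1 ≤ (pvE cc)^[j] (i+1) := by
  intro j
  induction j with
  | zero => simp
  | succ j ih =>
    rw [Function.iterate_succ_apply']
    have := pvE_gt cc ((pvE cc)^[j] (i+1))
    omega

theorem pvE_eq_chain (cc : List Int) (i : Nat)
    (hk : ∀ m < cc.length, 0 ≤ cc.getD m 0)
    (hp : ∀ m < cc.length, pvP cc cc.length < pvP cc m)
    (hi : i < cc.length) :
    pvE cc i = (pvE cc)^[(cc.getD i 0).toNat] (i+1) := by
  obtain ⟨hKle, hKP, _⟩ := pvChain cc i hk hp hi (cc.getD i 0).toNat le_rfl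
  apply le_antisymm
  · refine Nat.find_min' (pvE_ex cc i) (Or.inl ⟨?_, hKle, ?_⟩)
    · have := pvChain_ge cc i (cc.getD i 0).toNat; omega
    · rw [hKP]; ring
  · by_contra hcon
    push_neg at hcon
    have hcov := pvChainCover cc i hk hp hi (cc.getD i 0).toNat le_rfl (pvE cc i)
      (pvE_gt cc i) hcon
    have := (pvE_spec cc i hk hp hi).2
    omega
theorem pvSeg_nil (cc : List Int) (i j : Nat) (h : j ≤ i) : pvSeg cc i j = [] := by
  unfold pvSeg
  rw [show j - i = 0 by omega]
  rfl

theorem pvSeg_cons (cc : List Int) (i j : Nat) (h : i < j) :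
    pvSeg cc i j = ((i : Int), cc.getD i 0) :: pvSeg cc (i+1) j := by
  unfold pvSeg
  rw [show j - i = (j - (i+1)) + 1 by omega, List.range'_succ]
  rfl

theorem pvSeg_append (cc : List Int) (i j l : Nat) (h1 : i ≤ j) (h2 : j ≤ l) :
    pvSeg cc i j ++ pvSeg cc j l = pvSeg cc i l := by
  unfold pvSeg
  rw [← List.map_append]
  congr 1
  rw [show l - i = (j - i) + (l - j) by omega, ← List.range'_append]
  rw [show i + 1 * (j - i) = j by omega]

theorem pvEnum_eq_seg (cc : List Int) :
    PySem.List.enumerate cc 0 = pvSeg cc 0 cc.length := by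
  apply List.ext_getElem
  · simp [PySem.List.length_enumerate, pvSeg]
  · intro k h1 h2
    rw [PySem.List.getElem_enumerate]
    unfold pvSeg
    rw [List.getElem_map, List.getElem_range']
    have hk : k < cc.length := by rw [PySem.List.length_enumerate] at h1; exact h1
    rw [show 0 + 1 * k = k by omega]
    rw [List.getD_eq_getElem?_getD, List.getElem?_eq_getElem hk, Option.getD_some]
    simp

theorem pvKeys_modify_of_contains (d : PySem.Dict Int (List Int)) (k : Int) (f : List Int → List Int)
    (h : d.contains k = true) : (d.modify k [] f).keys = d.keys := by
  rw [PySem.Dict.keys_modify, PySem.Dict.keys_insert_of_contains _ _ h]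

theorem pvMem_popZeros (st : List (Int × Int)) : ∀ x ∈ pvPopZeros st, x ∈ st := by
  induction st with
  | nil => intro x hx; exact hx
  | cons y st ih =>
    intro x hx
    rcases y with ⟨p, r⟩
    unfold pvPopZeros at hx
    split_ifs at hx with h
    · exact List.mem_cons_of_mem _ (ih x hx)
    · exact hx

theorem pvKeys_foldA : ∀ (l : List (Int × Int)) (s : PySem.Dict Int (List Int) × List (Int × Int)),
    (∀ pr ∈ s.2, s.1.contains pr.1 = true) →
    (∀ ik ∈ l, s.1.contains ik.1 = true) →
    ((l.foldl pvStepA s).1).keys = s.1.keys := by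
  intro l
  induction l with
  | nil => intro s _ _; rfl
  | cons x l ih =>
    intro s hstk hl
    rw [List.foldl_cons]
    have hmono : ∀ v, s.1.contains v = true → (pvStepA s x).1.contains v = true := by
      intro v hv
      unfold pvStepA
      rcases hs : s.2 with _ | ⟨⟨p, r⟩, S⟩
      · simpa using hv
      · simp only []
        rw [PySem.Dict.contains_modify]
        simp [hv]
    have hkeys : (pvStepA s x).1.keys = s.1.keys := by
      unfold pvStepA
      rcases hs : s.2 with _ | ⟨⟨p, r⟩, S⟩
      · rfl
      · simp only []
        exact pvKeys_modify_of_contains _ _ _ (hstk (p, r) (by rw [hs]; exact List.mem_cons_self))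
    have hstk' : ∀ pr ∈ (pvStepA s x).2, (pvStepA s x).1.contains pr.1 = true := by
      intro pr hpr
      unfold pvStepA at hpr
      rcases hs : s.2 with _ | ⟨⟨p, r⟩, S⟩ <;> rw [hs] at hpr <;> simp only [] at hpr
      · rcases List.mem_cons.mp (pvMem_popZeros _ _ hpr) with h | h
        · rw [h]; exact hmono _ (hl x List.mem_cons_self)
        · simp at h
      · rcases List.mem_cons.mp (pvMem_popZeros _ _ hpr) with h | h
        · rw [h]; exact hmono _ (hl x List.mem_cons_self)
        · rcases List.mem_cons.mp h with h' | h'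
          · rw [h']; exact hmono _ (hstk (p, r) (by rw [hs]; exact List.mem_cons_self))
          · exact hmono _ (hstk pr (by rw [hs]; exact List.mem_cons_of_mem _ h'))
    rw [ih _ hstk' (fun ik hik => hmono _ (hl ik (List.mem_cons_of_mem _ hik))), hkeys]

theorem pvFoldl_const_iterate {α β : Type} (g : β → β) (l : List α) (init : β) :
    l.foldl (fun s _ => g s) init = g^[l.length] init := by
  induction l generalizing init with
  | nil => rfl
  | cons x l ih => rw [List.foldl_cons, ih, List.length_cons, Function.iterate_succ_apply]

theorem pvGetD_init (l : List Int) :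
    ∀ (d : PySem.Dict Int (List Int)), (∀ v : Int, d.getD v [] = []) →
      ∀ v : Int, (l.foldl (fun d i => d.insert i ([] : List Int)) d).getD v [] = [] := by
  induction l with
  | nil => intro d hd v; exact hd v
  | cons x l ih =>
    intro d hd v
    rw [List.foldl_cons]
    refine ih _ ?_ v
    intro w
    rw [PySem.Dict.getD_insert]
    split_ifs with h
    · rfl
    · exact hd w

theorem pvInit_items (n : Int) :
    ((PySem.List.pyRange 0 n 1).foldl (fun d i => d.insert i ([] : List Int)) PySem.Dict.empty).items
      = (PySem.List.pyRange 0 n 1).map (fun a => (a, ([] : List Int))) := by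
  have := PySem.Dict.items_foldl_insert_fresh (l := PySem.List.pyRange 0 n 1)
    (k := fun a => a) (v := fun _ => ([] : List Int)) (d := PySem.Dict.empty)
    (by intro a _; simp) (by simpa using PySem.List.nodup_pyRange_one 0 n)
  simpa using this

theorem pvRootsOf_unfold (cc : List Int) (i : Nat) (h : i < cc.length) :
    pvRootsOf cc i = ((pvE cc i - i : Nat) : Int) :: pvRootsOf cc (pvE cc i) := by
  rw [pvRootsOf]
  simp [h]

theorem pvRootsOf_nil (cc : List Int) (i : Nat) (h : cc.length ≤ i) :
    pvRootsOf cc i = [] := by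
  rw [pvRootsOf]
  simp [Nat.not_lt_of_le h]

theorem pvChain_mono (cc : List Int) (x : Nat) : ∀ a b : Nat, a ≤ b →
    (pvE cc)^[a] x ≤ (pvE cc)^[b] x := by
  intro a b hab
  induction b with
  | zero => rw [show a = 0 by omega]
  | succ b ih =>
    by_cases h : a = b + 1
    · rw [h]
    · have h1 := ih (by omega)
      rw [Function.iterate_succ_apply']
      have h2 := pvE_gt cc ((pvE cc)^[b] x)
      omega

theorem pvChainRoots (cc : List Int) (i : Nat)
    (hk : ∀ m < cc.length, 0 ≤ cc.getD m 0)
    (hp : ∀ m < cc.length, pvP cc cc.length < pvP cc m)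
    (hi : i < cc.length) :
    ∀ (u j : Nat), j ≤ (cc.getD i 0).toNat → (cc.getD i 0).toNat - j ≤ u →
      (((pvRootsOf cc ((pvE cc)^[j] (i+1))).take ((cc.getD i 0).toNat - j)).sum
          = (((pvE cc)^[(cc.getD i 0).toNat] (i+1) - (pvE cc)^[j] (i+1) : Nat) : Int))
      ∧ (pvRootsOf cc ((pvE cc)^[j] (i+1))).drop ((cc.getD i 0).toNat - j)
          = pvRootsOf cc ((pvE cc)^[(cc.getD i 0).toNat] (i+1)) := by
  intro u
  induction u with
  | zero =>
    intro j hj hu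
    rw [show (cc.getD i 0).toNat - j = 0 by omega, show j = (cc.getD i 0).toNat by omega]
    simp
  | succ u ih =>
    intro j hj hu
    by_cases hjK : j = (cc.getD i 0).toNat
    · rw [hjK]; simp
    · have hjlt : j < (cc.getD i 0).toNat := by omega
      have hcj_lt := (pvChain cc i hk hp hi j (by omega)).2.2 hjlt
      rw [pvRootsOf_unfold cc _ hcj_lt, ← Function.iterate_succ_apply' (pvE cc) j (i+1)]
      rw [show (cc.getD i 0).toNat - j = ((cc.getD i 0).toNat - (j+1)) + 1 by omega]
      rw [List.take_succ_cons, List.drop_succ_cons]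
      obtain ⟨ihs, ihd⟩ := ih (j+1) (by omega) (by omega)
      refine ⟨?_, ihd⟩
      rw [List.sum_cons, ihs]
      have hm1 : (pvE cc)^[j] (i+1) ≤ (pvE cc)^[j+1] (i+1) := pvChain_mono cc (i+1) j (j+1) (by omega)
      have hm2 : (pvE cc)^[j+1] (i+1) ≤ (pvE cc)^[(cc.getD i 0).toNat] (i+1) :=
        pvChain_mono cc (i+1) (j+1) _ (by omega)
      have hgt : (pvE cc)^[j] (i+1) < (pvE cc)^[j+1] (i+1) := by
        rw [Function.iterate_succ_apply']
        exact pvE_gt cc _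
      simp only [Nat.succ_eq_add_one] at *
      omega

theorem pvSizes_fold (cc : List Int)
    (hk : ∀ m < cc.length, 0 ≤ cc.getD m 0)
    (hp : ∀ m < cc.length, pvP cc cc.length < pvP cc m) :
    ∀ (u i : Nat), i ≤ cc.length → cc.length - i ≤ u →
      (cc.drop i).foldr pvSizesStep ([], []) =
        ((List.range' i (cc.length - i)).map (fun (v : Nat) => ((pvE cc v - v : Nat) : Int)),
         pvRootsOf cc i) := by
  intro u
  induction u with
  | zero =>
    intro i h1 h2
    rw [show i = cc.length by omega]
    rw [List.drop_length, pvRootsOf_nil cc _ (le_refl _), Nat.sub_self]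
    rfl
  | succ u ih =>
    intro i h1 h2
    by_cases hin : i = cc.length
    · rw [hin, List.drop_length, pvRootsOf_nil cc _ (le_refl _), Nat.sub_self]
      rfl
    · have hi : i < cc.length := by omega
      rw [List.drop_eq_getElem_cons hi, List.foldr_cons, ih (i+1) (by omega) (by omega)]
      have hchain := pvChainRoots cc i hk hp hi ((cc.getD i 0).toNat) 0 (by omega) (by omega)
      rw [Function.iterate_zero, id] at hchain
      rw [Nat.sub_zero] at hchain
      obtain ⟨hsum, hdrop⟩ := hchain
      have hEchain := pvE_eq_chain cc i hk hp hi
      have hgt := pvE_gt cc i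
      have hle := (pvE_spec cc i hk hp hi).1
      unfold pvSizesStep
      simp only []
      have hgetd : cc.getD i 0 = cc[i] := by
        rw [List.getD_eq_getElem?_getD, List.getElem?_eq_getElem hi, Option.getD_some]
      rw [Prod.mk.injEq]
      refine ⟨?_, ?_⟩
      · rw [show cc.length - i = (cc.length - (i+1)) + 1 by omega, List.range'_succ]
        rw [List.map_cons]
        congr 1
        rw [← hgetd, hsum, ← hEchain]
        omega
      · rw [← hgetd, hsum, hdrop, ← hEchain]
        rw [pvRootsOf_unfold cc i hi]
        congr 1
        omega

theorem pvGetD_sizes (cc : List Int)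
    (v : Nat) (hv : v < cc.length) :
    PySem.List.pyGetD ((List.range' 0 cc.length).map (fun (v : Nat) => ((pvE cc v - v : Nat) : Int))) (v : Int) 0
      = ((pvE cc v - v : Nat) : Int) := by
  rw [PySem.List.pyGetD_of_nonneg _ _ (by omega)]
  rw [Int.toNat_natCast]
  have hlen : v < ((List.range' 0 cc.length).map (fun (v : Nat) => ((pvE cc v - v : Nat) : Int))).length := by
    simp [hv]
  rw [List.getD_eq_getElem?_getD, List.getElem?_eq_getElem hlen, Option.getD_some]
  rw [List.getElem_map, List.getElem_range']
  rw [show 0 + 1 * v = v by omega]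

def pvSizesL (cc : List Int) : List Int :=
  (List.range' 0 cc.length).map (fun (v : Nat) => ((pvE cc v - v : Nat) : Int))

def pvBStep (sizes : List Int) (key : Int) (dc : PySem.Dict Int (List Int) × Int) :
    PySem.Dict Int (List Int) × Int :=
  (dc.1.modify key [] (fun l => l ++ [dc.2]), dc.2 + PySem.List.pyGetD sizes dc.2 0)

theorem pvDrop_range (n t : Nat) : (List.range n).drop t = List.range' t (n - t) := by
  apply List.ext_getElem
  · simp
  · intro k h1 h2
    rw [List.getElem_drop, List.getElem_range, List.getElem_range']
    omega

theorem pvChl_length (cc : List Int) (v : Nat) :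
    (pvChl cc v).length = (cc.getD v 0).toNat := by
  unfold pvChl
  rw [List.length_map, List.length_range]

theorem pvChl_drop (cc : List Int) (i t : Nat) (ht : t < (cc.getD i 0).toNat) :
    (pvChl cc i).drop t = (((pvE cc)^[t] (i+1) : Nat) : Int) :: (pvChl cc i).drop (t+1) := by
  unfold pvChl
  rw [← List.map_drop, ← List.map_drop]
  rw [pvDrop_range, pvDrop_range]
  rw [show (cc.getD i 0).toNat - t = ((cc.getD i 0).toNat - (t+1)) + 1 by omega]
  rw [List.range'_succ]
  rfl

theorem pvChl_drop_len (cc : List Int) (i : Nat) :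
    (pvChl cc i).drop (cc.getD i 0).toNat = [] := by
  apply List.drop_eq_nil_of_le
  rw [pvChl_length]

theorem pvGetD_sizesL (cc : List Int) (v : Nat) (hv : v < cc.length) :
    PySem.List.pyGetD (pvSizesL cc) (v : Int) 0 = ((pvE cc v - v : Nat) : Int) :=
  pvGetD_sizes cc v hv

theorem pvAttach_iter (cc : List Int)
    (hk : ∀ m < cc.length, 0 ≤ cc.getD m 0)
    (hp : ∀ m < cc.length, pvP cc cc.length < pvP cc m)
    (i : Nat) (hi : i < cc.length) :
    ∀ (q t : Nat), t + q = (cc.getD i 0).toNat → ∀ (d' : PySem.Dict Int (List Int)) (m : Nat),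
      (((pvBStep (pvSizesL cc) (i : Int))^[q] (d', (((pvE cc)^[t] (i+1) : Nat) : Int))).1).getD (m : Int) []
      = (if m = i then d'.getD (i : Int) [] ++ (pvChl cc i).drop t else d'.getD (m : Int) []) := by
  intro q
  induction q with
  | zero =>
    intro t ht d' m
    rw [Function.iterate_zero, id]
    rw [show t = (cc.getD i 0).toNat by omega, pvChl_drop_len]
    split_ifs with h
    · rw [h]; simp
    · rfl
  | succ q ih =>
    intro t ht d' m
    rw [Function.iterate_succ_apply]
    have hct : (pvE cc)^[t] (i+1) < cc.length :=
      (pvChain cc i hk hp hi t (by omega)).2.2 (by omega)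
    have hgd := pvGetD_sizesL cc ((pvE cc)^[t] (i+1)) hct
    have hnext : (((pvE cc)^[t] (i+1) : Nat) : Int) + ((pvE cc ((pvE cc)^[t] (i+1)) - (pvE cc)^[t] (i+1) : Nat) : Int)
        = (((pvE cc)^[t+1] (i+1) : Nat) : Int) := by
      rw [Function.iterate_succ_apply']
      have := pvE_gt cc ((pvE cc)^[t] (i+1))
      omega
    rw [show pvBStep (pvSizesL cc) (i : Int) (d', (((pvE cc)^[t] (i+1) : Nat) : Int))
          = (d'.modify (i : Int) [] (fun l => l ++ [(((pvE cc)^[t] (i+1) : Nat) : Int)]),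
             (((pvE cc)^[t+1] (i+1) : Nat) : Int)) from by
        unfold pvBStep; rw [hgd, hnext]]
    rw [ih (t+1) (by omega) _ m]
    split_ifs with h
    · rw [PySem.Dict.getD_modify, if_pos rfl]
      rw [pvChl_drop cc i t (by omega)]
      simp
    · rw [PySem.Dict.getD_modify, if_neg (by exact_mod_cast h)]

theorem pvAttach_eq_iter (sizes : List Int) (d : PySem.Dict Int (List Int)) (ik : Int × Int) :
    pvAttach sizes d ik = ((pvBStep sizes ik.1)^[(List.range ik.2.toNat).length] (d, ik.1 + 1)).1 := by
  unfold pvAttach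
  have heq : (fun (dc : PySem.Dict Int (List Int) × Int) (_ : Nat) =>
        (dc.1.modify ik.1 [] fun l => l ++ [dc.2], dc.2 + PySem.List.pyGetD sizes dc.2 0))
      = (fun (s : PySem.Dict Int (List Int) × Int) (_ : Nat) => pvBStep sizes ik.1 s) := rfl
  rw [heq, pvFoldl_const_iterate (pvBStep sizes ik.1) (List.range ik.2.toNat) (d, ik.1 + 1)]

theorem pvAttach_getD (cc : List Int)
    (hk : ∀ m < cc.length, 0 ≤ cc.getD m 0)
    (hp : ∀ m < cc.length, pvP cc cc.length < pvP cc m)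
    (i : Nat) (hi : i < cc.length) (d : PySem.Dict Int (List Int)) (m : Nat) :
    (pvAttach (pvSizesL cc) d ((i : Int), cc.getD i 0)).getD (m : Int) []
      = (if m = i then d.getD (i : Int) [] ++ pvChl cc i else d.getD (m : Int) []) := by
  rw [pvAttach_eq_iter]
  have h0 : ((i : Int) + 1) = (((pvE cc)^[0] (i+1) : Nat) : Int) := by
    rw [Function.iterate_zero, id]
    push_cast; ring
  rw [List.length_range]
  simp only []
  rw [h0, pvAttach_iter cc hk hp i hi (cc.getD i 0).toNat 0 (by omega) d m]
  rw [List.drop_zero]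

theorem pvBStep_keys (sizes : List Int) (key : Int) :
    ∀ (q : Nat) (dc : PySem.Dict Int (List Int) × Int),
      dc.1.contains key = true →
      (((pvBStep sizes key)^[q] dc).1.keys = dc.1.keys ∧
       ∀ v, dc.1.contains v = true → ((pvBStep sizes key)^[q] dc).1.contains v = true) := by
  intro q
  induction q with
  | zero => intro dc h; exact ⟨rfl, fun v hv => hv⟩
  | succ q ih =>
    intro dc h
    rw [Function.iterate_succ_apply]
    have hc : (pvBStep sizes key dc).1.contains key = true := by
      unfold pvBStep
      rw [PySem.Dict.contains_modify]
      simp [h]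
    obtain ⟨hk1, hk2⟩ := ih (pvBStep sizes key dc) hc
    refine ⟨?_, ?_⟩
    · rw [hk1]
      unfold pvBStep
      exact pvKeys_modify_of_contains _ _ _ h
    · intro v hv
      refine hk2 v ?_
      unfold pvBStep
      rw [PySem.Dict.contains_modify]
      simp [hv]

theorem pvAttach_keys (sizes : List Int) (d : PySem.Dict Int (List Int)) (ik : Int × Int)
    (h : d.contains ik.1 = true) :
    (pvAttach sizes d ik).keys = d.keys ∧
    ∀ v, d.contains v = true → (pvAttach sizes d ik).contains v = true := by
  rw [pvAttach_eq_iter]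
  exact pvBStep_keys sizes ik.1 _ (d, ik.1 + 1) h

theorem pvKeys_foldB (sizes : List Int) :
    ∀ (l : List (Int × Int)) (d : PySem.Dict Int (List Int)),
      (∀ ik ∈ l, d.contains ik.1 = true) →
      (l.foldl (pvAttach sizes) d).keys = d.keys := by
  intro l
  induction l with
  | nil => intro d _; rfl
  | cons x l ih =>
    intro d hl
    rw [List.foldl_cons]
    obtain ⟨h1, h2⟩ := pvAttach_keys sizes d x (hl x List.mem_cons_self)
    rw [ih _ (fun ik hik => h2 ik.1 (hl ik (List.mem_cons_of_mem _ hik))), h1]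

theorem pvFoldB_getD (cc : List Int)
    (hk : ∀ m < cc.length, 0 ≤ cc.getD m 0)
    (hp : ∀ m < cc.length, pvP cc cc.length < pvP cc m) :
    ∀ (u i : Nat), i ≤ cc.length → cc.length - i ≤ u →
      ∀ (d : PySem.Dict Int (List Int)) (m : Nat),
        ((pvSeg cc i cc.length).foldl (pvAttach (pvSizesL cc)) d).getD (m : Int) []
          = (if i ≤ m ∧ m < cc.length then d.getD (m : Int) [] ++ pvChl cc m else d.getD (m : Int) []) := by
  intro u
  induction u with
  | zero =>
    intro i h1 h2 d m
    rw [pvSeg_nil cc i cc.length (by omega)]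
    rw [if_neg (by omega)]
    rfl
  | succ u ih =>
    intro i h1 h2 d m
    by_cases hin : i = cc.length
    · rw [pvSeg_nil cc i cc.length (by omega), if_neg (by omega)]
      rfl
    · have hi : i < cc.length := by omega
      rw [pvSeg_cons cc i cc.length hi, List.foldl_cons]
      rw [ih (i+1) (by omega) (by omega) _ m]
      by_cases hmi : m = i
      · rw [if_neg (by omega), hmi]
        rw [pvAttach_getD cc hk hp i hi d i, if_pos rfl, if_pos (by omega)]
      · rw [pvAttach_getD cc hk hp i hi d m, if_neg hmi]
        by_cases hmr : i + 1 ≤ m ∧ m < cc.length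
        · rw [if_pos hmr, if_pos (by omega)]
        · rw [if_neg hmr, if_neg (by omega)]

def pvDA (d : PySem.Dict Int (List Int)) (st : List (Int × Int)) (i : Int) :
    PySem.Dict Int (List Int) :=
  match st with
  | (p, _) :: _ => d.modify p [] (fun l => l ++ [i])
  | [] => d

def pvStD (st : List (Int × Int)) : List (Int × Int) :=
  match st with
  | (p, r) :: S => (p, r - 1) :: S
  | [] => []

theorem pvStepA_eq (d : PySem.Dict Int (List Int)) (st : List (Int × Int)) (x : Int × Int) :
    pvStepA (d, st) x = (pvDA d st x.1, pvPopZeros ((x.1, x.2) :: pvStD st)) := by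
  rcases st with _ | ⟨⟨p, r⟩, S⟩ <;> rfl

theorem pvPopZeros_cons_ne (p r : Int) (st : List (Int × Int)) (h : ¬ r = 0) :
    pvPopZeros ((p, r) :: st) = (p, r) :: st := by
  conv_lhs => rw [pvPopZeros]
  rw [if_neg h]

theorem pvPopZeros_cons_zero (p : Int) (st : List (Int × Int)) :
    pvPopZeros ((p, (0 : Int)) :: st) = pvPopZeros st := by
  conv_lhs => rw [pvPopZeros]
  rw [if_pos rfl]

theorem pvTree (cc : List Int)
    (hk : ∀ m < cc.length, 0 ≤ cc.getD m 0)
    (hp : ∀ m < cc.length, pvP cc cc.length < pvP cc m) :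
    ∀ (N i : Nat), i < cc.length → pvE cc i - i ≤ N →
      ∀ (d : PySem.Dict Int (List Int)) (st : List (Int × Int)),
        ((pvSeg cc i (pvE cc i)).foldl pvStepA (d, st)).2 = pvPopZeros (pvStD st) ∧
        ∀ m : Nat,
          (((pvSeg cc i (pvE cc i)).foldl pvStepA (d, st)).1).getD (m : Int) []
            = (if i ≤ m ∧ m < pvE cc i
               then (pvDA d st (i : Int)).getD (m : Int) [] ++ pvChl cc m
               else (pvDA d st (i : Int)).getD (m : Int) []) := by
  intro N
  induction N using Nat.strong_induction_on with
  | _ N IH =>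
  intro i hi hN d st
  have hE := pvE_gt cc i
  have hEn := (pvE_spec cc i hk hp hi).1
  have hkk := hk i hi
  have hcast : ((cc.getD i 0).toNat : Int) = cc.getD i 0 := Int.toNat_of_nonneg hkk
  have hEc := pvE_eq_chain cc i hk hp hi
  rw [pvSeg_cons cc i (pvE cc i) hE, List.foldl_cons, pvStepA_eq]
  by_cases hK : (cc.getD i 0).toNat = 0
  · -- leaf: no children
    have hk0 : cc.getD i 0 = 0 := by omega
    have hE1 : pvE cc i = i + 1 := by
      rw [hEc, hK, Function.iterate_zero, id]
    rw [hE1, pvSeg_nil cc (i+1) (i+1) (le_refl _)]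
    simp only [List.foldl_nil]
    constructor
    · rw [hk0, pvPopZeros_cons_zero]
    · intro m
      have hchl : pvChl cc i = [] := by
        unfold pvChl
        rw [hK]
        rfl
      split_ifs with h
      · rw [show m = i by omega, hchl, List.append_nil]
      · rfl
  · -- at least one child
    have hK1 : 1 ≤ (cc.getD i 0).toNat := by omega
    have hkne : ¬ (cc.getD i 0) = 0 := by omega
    rw [pvPopZeros_cons_ne _ _ _ hkne]
    -- inner loop over the children chain
    have inner : ∀ (q j : Nat), j + q = (cc.getD i 0).toNat → j < (cc.getD i 0).toNat →
        ∀ (d' : PySem.Dict Int (List Int)),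
          ((pvSeg cc ((pvE cc)^[j] (i+1)) ((pvE cc)^[(cc.getD i 0).toNat] (i+1))).foldl pvStepA
              (d', ((i : Int), cc.getD i 0 - (j : Int)) :: pvStD st)).2 = pvPopZeros (pvStD st) ∧
          ∀ m : Nat,
            (((pvSeg cc ((pvE cc)^[j] (i+1)) ((pvE cc)^[(cc.getD i 0).toNat] (i+1))).foldl pvStepA
                (d', ((i : Int), cc.getD i 0 - (j : Int)) :: pvStD st)).1).getD (m : Int) []
              = (if m = i then d'.getD (i : Int) [] ++ (pvChl cc i).drop j
                 else if (pvE cc)^[j] (i+1) ≤ m ∧ m < (pvE cc)^[(cc.getD i 0).toNat] (i+1)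
                 then d'.getD (m : Int) [] ++ pvChl cc m
                 else d'.getD (m : Int) []) := by
      intro q
      induction q with
      | zero => intro j hjq hj d'; omega
      | succ q ihq =>
        intro j hjq hj d'
        have hcj : (pvE cc)^[j] (i+1) < cc.length :=
          (pvChain cc i hk hp hi j (by omega)).2.2 hj
        have hcjge : i + 1 ≤ (pvE cc)^[j] (i+1) := pvChain_ge cc i j
        have hsucc : pvE cc ((pvE cc)^[j] (i+1)) = (pvE cc)^[j+1] (i+1) :=
          (Function.iterate_succ_apply' (pvE cc) j (i+1)).symm
        have hmono1 : (pvE cc)^[j+1] (i+1) ≤ (pvE cc)^[(cc.getD i 0).toNat] (i+1) :=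
          pvChain_mono cc (i+1) (j+1) _ (by omega)
        have hgtj : (pvE cc)^[j] (i+1) < (pvE cc)^[j+1] (i+1) := by
          rw [← hsucc]; exact pvE_gt cc _
        have hNj : pvE cc ((pvE cc)^[j] (i+1)) - (pvE cc)^[j] (i+1) ≤ N - 1 := by
          rw [hsucc]
          have hup : (pvE cc)^[(cc.getD i 0).toNat] (i+1) ≤ pvE cc i := le_of_eq hEc.symm
          omega
        have hTree := IH (N - 1) (by omega) ((pvE cc)^[j] (i+1)) hcj hNj d'
          (((i : Int), cc.getD i 0 - (j : Int)) :: pvStD st)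
        obtain ⟨hT2, hT1⟩ := hTree
        rw [hsucc] at hT2 hT1
        rw [show pvStD (((i : Int), cc.getD i 0 - (j : Int)) :: pvStD st)
              = ((i : Int), cc.getD i 0 - (j : Int) - 1) :: pvStD st from rfl] at hT2
        rw [← pvSeg_append cc ((pvE cc)^[j] (i+1)) ((pvE cc)^[j+1] (i+1))
              ((pvE cc)^[(cc.getD i 0).toNat] (i+1)) (by omega) hmono1,
            List.foldl_append]
        have hfold_pair : ((pvSeg cc ((pvE cc)^[j] (i+1)) ((pvE cc)^[j+1] (i+1))).foldl pvStepA
            (d', ((i : Int), cc.getD i 0 - (j : Int)) :: pvStD st))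
            = (((pvSeg cc ((pvE cc)^[j] (i+1)) ((pvE cc)^[j+1] (i+1))).foldl pvStepA
            (d', ((i : Int), cc.getD i 0 - (j : Int)) :: pvStD st)).1,
               pvPopZeros (((i : Int), cc.getD i 0 - (j : Int) - 1) :: pvStD st)) := by
          rw [← hT2]
        rw [hfold_pair]
        by_cases hlast : j + 1 = (cc.getD i 0).toNat
        · -- last child
          have hz : cc.getD i 0 - (j : Int) - 1 = 0 := by omega
          rw [hz, pvPopZeros_cons_zero]
          rw [show (pvE cc)^[(cc.getD i 0).toNat] (i+1) = (pvE cc)^[j+1] (i+1) by rw [hlast]]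
          rw [pvSeg_nil cc _ _ (le_refl _)]
          simp only [List.foldl_nil]
          refine ⟨by trivial, ?_⟩
          intro m
          rw [hT1 m]
          have hdrop : (pvChl cc i).drop j = [(((pvE cc)^[j] (i+1) : Nat) : Int)] := by
            rw [pvChl_drop cc i j hj, show j + 1 = (cc.getD i 0).toNat from hlast, pvChl_drop_len]
          by_cases hmi : m = i
          · rw [if_pos hmi, if_neg (by omega)]
            unfold pvDA
            simp only []
            rw [PySem.Dict.getD_modify, if_pos (by rw [hmi]), hdrop]
          · rw [if_neg hmi]
            by_cases hmr : (pvE cc)^[j] (i+1) ≤ m ∧ m < (pvE cc)^[j+1] (i+1)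
            · rw [if_pos hmr, if_pos (by omega)]
              unfold pvDA
              simp only []
              rw [PySem.Dict.getD_modify, if_neg (by exact_mod_cast (by omega : ¬ m = i))]
            · rw [if_neg hmr, if_neg (by omega)]
              unfold pvDA
              simp only []
              rw [PySem.Dict.getD_modify, if_neg (by exact_mod_cast hmi)]
        · -- more children follow
          have hz : ¬ (cc.getD i 0 - (j : Int) - 1 = 0) := by omega
          rw [pvPopZeros_cons_ne _ _ _ hz]
          have hstep : cc.getD i 0 - (j : Int) - 1 = cc.getD i 0 - ((j + 1 : Nat) : Int) := by
            push_cast; ring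
          rw [hstep]
          obtain ⟨hI2, hI1⟩ := ihq (j+1) (by omega) (by omega)
            (((pvSeg cc ((pvE cc)^[j] (i+1)) ((pvE cc)^[j+1] (i+1))).foldl pvStepA
              (d', ((i : Int), cc.getD i 0 - (j : Int)) :: pvStD st)).1)
          refine ⟨hI2, ?_⟩
          intro m
          rw [hI1 m]
          by_cases hmi : m = i
          · rw [if_pos hmi, if_pos hmi]
            rw [hT1 i, if_neg (by omega)]
            unfold pvDA
            simp only []
            rw [PySem.Dict.getD_modify, if_pos rfl]
            rw [pvChl_drop cc i j hj]
            rw [List.append_assoc]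
            rfl
          · rw [if_neg hmi, if_neg hmi]
            by_cases hm1 : (pvE cc)^[j+1] (i+1) ≤ m ∧ m < (pvE cc)^[(cc.getD i 0).toNat] (i+1)
            · rw [if_pos hm1]
              rw [hT1 m, if_neg (by omega)]
              unfold pvDA
              simp only []
              rw [PySem.Dict.getD_modify, if_neg (by exact_mod_cast hmi)]
              rw [if_pos (by omega)]
            · rw [if_neg hm1]
              rw [hT1 m]
              by_cases hm2 : (pvE cc)^[j] (i+1) ≤ m ∧ m < (pvE cc)^[j+1] (i+1)
              · rw [if_pos hm2]
                unfold pvDA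
                simp only []
                rw [PySem.Dict.getD_modify, if_neg (by exact_mod_cast hmi)]
                rw [if_pos (by omega)]
              · rw [if_neg hm2]
                unfold pvDA
                simp only []
                rw [PySem.Dict.getD_modify, if_neg (by exact_mod_cast hmi)]
                rw [if_neg (by omega)]
    -- assemble: first node then the chain from j = 0
    have hc0 : (pvE cc)^[0] (i+1) = i + 1 := by rw [Function.iterate_zero, id]
    have hseg2 : pvSeg cc (i+1) (pvE cc i)
        = pvSeg cc ((pvE cc)^[0] (i+1)) ((pvE cc)^[(cc.getD i 0).toNat] (i+1)) := by
      rw [hc0, ← hEc]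
    have hstk0 : ((i : Int), cc.getD i 0) = ((i : Int), cc.getD i 0 - ((0 : Nat) : Int)) := by
      norm_num
    obtain ⟨hI2, hI1⟩ := inner (cc.getD i 0).toNat 0 (by omega) (by omega) (pvDA d st (i : Int))
    rw [hseg2, hstk0]
    refine ⟨hI2, ?_⟩
    intro m
    rw [hI1 m]
    rw [hc0, ← hEc]
    by_cases hmi : m = i
    · rw [if_pos hmi, if_pos (by omega)]
      rw [List.drop_zero, hmi]
    · rw [if_neg hmi]
      by_cases hmr : i + 1 ≤ m ∧ m < pvE cc i
      · rw [if_pos hmr, if_pos (by omega)]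
      · rw [if_neg hmr, if_neg (by omega)]

theorem pvForest (cc : List Int)
    (hk : ∀ m < cc.length, 0 ≤ cc.getD m 0)
    (hp : ∀ m < cc.length, pvP cc cc.length < pvP cc m) :
    ∀ (u i : Nat), i ≤ cc.length → cc.length - i ≤ u →
      ∀ (d : PySem.Dict Int (List Int)),
        ((pvSeg cc i cc.length).foldl pvStepA (d, [])).2 = [] ∧
        ∀ m : Nat,
          (((pvSeg cc i cc.length).foldl pvStepA (d, [])).1).getD (m : Int) []
            = (if i ≤ m ∧ m < cc.length then d.getD (m : Int) [] ++ pvChl cc m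
               else d.getD (m : Int) []) := by
  intro u
  induction u with
  | zero =>
    intro i h1 h2 d
    rw [pvSeg_nil cc i cc.length (by omega)]
    exact ⟨rfl, fun m => by rw [if_neg (by omega)]; rfl⟩
  | succ u ih =>
    intro i h1 h2 d
    by_cases hin : i = cc.length
    · rw [pvSeg_nil cc i cc.length (by omega)]
      exact ⟨rfl, fun m => by rw [if_neg (by omega)]; rfl⟩
    · have hi : i < cc.length := by omega
      have hE := pvE_gt cc i
      have hEn := (pvE_spec cc i hk hp hi).1
      obtain ⟨hT2, hT1⟩ := pvTree cc hk hp (pvE cc i - i) i hi (le_refl _) d []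
      rw [show pvPopZeros (pvStD []) = [] from rfl] at hT2
      rw [← pvSeg_append cc i (pvE cc i) cc.length (by omega) hEn, List.foldl_append]
      have hfold_pair : ((pvSeg cc i (pvE cc i)).foldl pvStepA (d, []))
          = (((pvSeg cc i (pvE cc i)).foldl pvStepA (d, [])).1, ([] : List (Int × Int))) :=
        Prod.ext rfl hT2
      rw [hfold_pair]
      obtain ⟨hI2, hI1⟩ := ih (pvE cc i) (by omega) (by omega)
        (((pvSeg cc i (pvE cc i)).foldl pvStepA (d, [])).1)
      refine ⟨hI2, ?_⟩
      intro m
      rw [hI1 m, hT1 m]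
      rw [show pvDA d [] (i : Int) = d from rfl]
      by_cases hm1 : pvE cc i ≤ m ∧ m < cc.length
      · rw [if_pos hm1, if_neg (by omega), if_pos (by omega)]
      · rw [if_neg hm1]
        by_cases hm2 : i ≤ m ∧ m < pvE cc i
        · rw [if_pos hm2, if_pos (by omega)]
        · rw [if_neg hm2, if_neg (by omega)]

-- ===== VERDICT (by name: the statement is the Claim_ definition above) =====
theorem reconstruct_plane_tree_spec : Claim_equal_reconstruct_plane_tree := by
  unfold Claim_equal_reconstruct_plane_tree
  intro cc _ hpre
  unfold Spec_reconstruct_plane_tree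
  obtain ⟨hk0, hp0⟩ := hpre
  have hk : ∀ m < cc.length, 0 ≤ cc.getD m 0 := by
    intro m hm
    rw [List.getD_eq_getElem?_getD, List.getElem?_eq_getElem hm, Option.getD_some]
    exact hk0 _ (List.getElem_mem hm)
  have hp : ∀ m < cc.length, pvP cc cc.length < pvP cc m := by
    intro m hm
    have := hp0 m (List.mem_range.mpr hm)
    unfold pvP
    rw [List.take_length]
    exact this
  unfold reconstruct_plane_tree reconstruct_plane_tree_alt
  dsimp only
  -- the initial dict
  set init : PySem.Dict Int (List Int) :=
    (PySem.List.pyRange 0 (cc.length : Int) 1).foldl (fun d i => d.insert i []) PySem.Dict.empty with hinit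
  have hItemsInit : init.items = (PySem.List.pyRange 0 (cc.length : Int) 1).map (fun a => (a, ([] : List Int))) :=
    pvInit_items (cc.length : Int)
  have hKeysInit : init.keys = PySem.List.pyRange 0 (cc.length : Int) 1 := by
    simp only [PySem.Dict.keys, hItemsInit, List.map_map]
    calc (PySem.List.pyRange 0 (cc.length : Int) 1).map ((·.1) ∘ (fun a => (a, ([] : List Int))))
        = (PySem.List.pyRange 0 (cc.length : Int) 1).map id := List.map_congr_left (fun a _ => rfl)
      _ = _ := List.map_id _
  have hContainsInit : ∀ v : Int, 0 ≤ v → v < (cc.length : Int) → init.contains v = true := by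
    intro v h1 h2
    rw [PySem.Dict.contains_iff_mem_keys, hKeysInit, PySem.List.mem_pyRange_one]
    exact ⟨h1, h2⟩
  have hGetDInit : ∀ v : Int, init.getD v [] = [] := by
    refine pvGetD_init _ PySem.Dict.empty (fun v => ?_)
    simp
  have hSegMem : ∀ ik ∈ pvSeg cc 0 cc.length, init.contains ik.1 = true := by
    intro ik hik
    unfold pvSeg at hik
    obtain ⟨m, hm, rfl⟩ := List.mem_map.mp hik
    have hmm : m < cc.length := by
      have := List.mem_range'_1.mp hm
      omega
    show init.contains ((m : Nat) : Int) = true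
    exact hContainsInit _ (by positivity) (by exact_mod_cast hmm)
  -- sizes list of B
  have hSizes : (cc.foldr pvSizesStep ([], [])).1 = pvSizesL cc := by
    have := pvSizes_fold cc hk hp cc.length 0 (by omega) (by omega)
    rw [List.drop_zero, Nat.sub_zero] at this
    rw [this]
    rfl
  rw [hSizes, pvEnum_eq_seg]
  -- A side
  obtain ⟨hA2, hA1⟩ := pvForest cc hk hp cc.length 0 (by omega) (by omega) init
  have hAkeys : ((pvSeg cc 0 cc.length).foldl pvStepA (init, [])).1.keys = init.keys :=
    pvKeys_foldA _ (init, []) (by intro pr hpr; simp at hpr) hSegMem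
  -- B side
  obtain hB1 := pvFoldB_getD cc hk hp cc.length 0 (by omega) (by omega) init
  have hBkeys : ((pvSeg cc 0 cc.length).foldl (pvAttach (pvSizesL cc)) init).keys = init.keys :=
    pvKeys_foldB (pvSizesL cc) _ init hSegMem
  have hNodupA : ((pvSeg cc 0 cc.length).foldl pvStepA (init, [])).1.keys.Nodup := by
    rw [hAkeys, hKeysInit]
    exact PySem.List.nodup_pyRange_one 0 _
  have hNodupB : ((pvSeg cc 0 cc.length).foldl (pvAttach (pvSizesL cc)) init).keys.Nodup := by
    rw [hBkeys, hKeysInit]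
    exact PySem.List.nodup_pyRange_one 0 _
  rw [PySem.Dict.items_eq_map_keys _ hNodupA [], PySem.Dict.items_eq_map_keys _ hNodupB []]
  rw [hAkeys, hBkeys]
  apply List.map_congr_left
  intro v hv
  rw [hKeysInit, PySem.List.mem_pyRange_one] at hv
  have hmv : v = ((v.toNat : Nat) : Int) := by omega
  have hvlt : v.toNat < cc.length := by omega
  rw [hmv, hA1 v.toNat, hB1 v.toNat]
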